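-- pv_equiv track=rewrite | github.com/SomanathDevoplers/Hosangadi2.0 | frontend/root.py | val_mobile
-- ===== SOURCE A (Python) =====
-- def val_mobile(char):
--     flag = True
--
--     if len(char)>0:
--         if "+" in char[1:]:
--             return False
--
--     for each in char:
--         if not (each.isdigit() or each == "+"):
--             flag = False
--     return flag
-- ===== SOURCE B (Python) =====
-- import re
--
-- _MOBILE_RE = re.compile(r'\+?\d*')
--
-- def val_mobile(char):
--     return _MOBILE_RE.fullmatch(char) is not None
-- ===== Notes on version B (the rewrite author's own statement) =====
-- stated objective: idiomatic
-- what changed: Replaced the explicit per-character flag loop plus the separate membership scan over the tail with a single precompiled regex fullmatch (optional leading plus, then digits only).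
import Mathlib
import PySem

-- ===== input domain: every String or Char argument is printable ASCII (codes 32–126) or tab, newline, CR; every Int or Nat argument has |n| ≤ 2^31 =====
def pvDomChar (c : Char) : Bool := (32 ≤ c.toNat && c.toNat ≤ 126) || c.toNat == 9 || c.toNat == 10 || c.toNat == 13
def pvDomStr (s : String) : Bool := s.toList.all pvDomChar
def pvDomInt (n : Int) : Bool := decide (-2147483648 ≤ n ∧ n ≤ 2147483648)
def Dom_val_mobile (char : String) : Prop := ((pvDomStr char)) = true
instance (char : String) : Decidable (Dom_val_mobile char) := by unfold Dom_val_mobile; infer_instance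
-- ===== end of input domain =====

-- B replaces A's flag loop + membership scan by a regex fullmatch (\+?\d*); idiomatic, same cost.
-- ===== PORT A =====
def val_mobile (char : String) : Bool :=
  let flag := true
  if (if char.toList.length > 0 then
        decide ('+' ∈ PySem.List.slice char.toList (some 1) none)
      else false) then
    false
  else
    char.toList.foldl
      (fun f each => if !(PySem.Chars.isdigit each || each == '+') then false else f) flag

-- ===== PORT B =====
-- hand-port of the regex \+?\d* fullmatch: drop one optional leading '+', then all digits
def val_mobile_alt (char : String) : Bool :=
  (match char.toList with
   | '+' :: rest => rest
   | cs => cs).all PySem.Chars.isdigit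

-- ===== PRECONDITION & SPEC =====
def Spec_val_mobile (char : String) (out : Bool) : Prop := out = val_mobile_alt char
instance (char : String) (out : Bool) : Decidable (Spec_val_mobile char out) := by unfold Spec_val_mobile; infer_instance

-- ===== CLAIM (what is proved, stated in full; the proofs are below) =====
def Claim_equal_val_mobile : Prop := ∀ (char : String), Dom_val_mobile char → Spec_val_mobile char (val_mobile char)

-- ===== LEMMAS AND PROOFS =====
lemma foldl_flag (l : List Char) (b : Bool) :
    l.foldl (fun f each => if !(PySem.Chars.isdigit each || each == '+') then false else f) b
      = (b && l.all (fun c => PySem.Chars.isdigit c || c == '+')) := by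
  induction l generalizing b with
  | nil => simp
  | cons c t ih =>
    simp only [List.foldl_cons, List.all_cons, ih]
    by_cases h : (PySem.Chars.isdigit c || c == '+') = true <;> simp [h]

lemma all_digit_of_no_plus (l : List Char) (h : '+' ∉ l) :
    l.all (fun c => PySem.Chars.isdigit c || c == '+') = l.all PySem.Chars.isdigit := by
  induction l with
  | nil => rfl
  | cons c t ih =>
    simp only [List.mem_cons, not_or] at h
    have hb : (c == '+') = false := by simpa using fun e => h.1 e.symm
    simp [List.all_cons, ih h.2, hb]

lemma all_digit_false_of_plus (l : List Char) (h : '+' ∈ l) :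
    l.all PySem.Chars.isdigit = false := by
  simp only [List.all_eq_false]
  exact ⟨'+', h, by decide⟩


-- ===== VERDICT (by name: the statement is the Claim_ definition above) =====
theorem val_mobile_spec : Claim_equal_val_mobile := by
  intro char _
  unfold Spec_val_mobile val_mobile val_mobile_alt
  rw [PySem.List.slice_from_one]
  cases h : char.toList with
  | nil => simp
  | cons c rest =>
    simp only [List.length_cons, List.tail_cons]
    by_cases hp : '+' ∈ rest
    · have hd := all_digit_false_of_plus rest hp
      by_cases hc : c = '+' <;> simp [hp, hc, hd, List.all_cons]
    · simp only [hp, Nat.succ_pos, if_true, decide_false, Bool.false_eq_true, if_false,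
        foldl_flag, Bool.true_and, List.all_cons, all_digit_of_no_plus rest hp]
      by_cases hc : c = '+'
      · subst hc; simp
      · have hb : (c == '+') = false := by simpa using hc
        have hm : (match c :: rest with
            | '+' :: rest => rest
            | cs => cs) = c :: rest := by
          split
          next r heq =>
            exact absurd (List.cons.injEq .. ▸ congrArg id heq) (by simp [hc])
          next => rfl
        rw [hm]
        simp [hb]
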